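-- pv_equiv track=rewrite | github.com/yr4000/Python-university-projects | hw2/305638926.py | altsum_digits
-- ===== SOURCE A (Python) =====
-- def altsum_digits(n, d):
--     str_n = str(n)
--     dig_sum = 0
--     for i in range (d): # calculate the first sum
--         dig_sum += ((-1)**i)*int(str_n[i])
--
--     temp_sum = dig_sum
--     k = 0
--     left_number = 0
--     right_number = 0
--
--     for num in str_n:
--         if (d+k) >= len(str_n): break
--         left_number = int(str_n[k])
--         right_number = int(str_n[d + k])*(-1)**((d%2)+1)
--         temp_sum = (-1)*(temp_sum - left_number) + right_number
--         if temp_sum > dig_sum: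
--             dig_sum = temp_sum
--         k += 1
--
--     return dig_sum
-- ===== SOURCE B (Python) =====
-- def altsum_digits(n, d):
--     s = str(n)
--
--     def window(k):
--         return sum((-1) ** i * int(s[k + i]) for i in range(d))
--
--     best = window(0)
--     for k in range(1, len(s) - d + 1):
--         cur = window(k)
--         if cur > best:
--             best = cur
--     return best
-- ===== Notes on version B (the rewrite author's own statement) =====
-- stated objective: simpler
-- what changed: B drops A's incremental temp_sum recurrence (with its (-1)**(d%2+1) sign bookkeeping) and recomputes each window's alternating digit sum independently, keeping a running maximum; Pre_ excludes n < 0 and d > len(str(n)) (where A raises) and d < 0, where A's returned value comes from negative-index wraparound.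
-- outside the precondition, e.g. on altsum_digits(12345, -2): A returns 2, B returns 0
import Mathlib
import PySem

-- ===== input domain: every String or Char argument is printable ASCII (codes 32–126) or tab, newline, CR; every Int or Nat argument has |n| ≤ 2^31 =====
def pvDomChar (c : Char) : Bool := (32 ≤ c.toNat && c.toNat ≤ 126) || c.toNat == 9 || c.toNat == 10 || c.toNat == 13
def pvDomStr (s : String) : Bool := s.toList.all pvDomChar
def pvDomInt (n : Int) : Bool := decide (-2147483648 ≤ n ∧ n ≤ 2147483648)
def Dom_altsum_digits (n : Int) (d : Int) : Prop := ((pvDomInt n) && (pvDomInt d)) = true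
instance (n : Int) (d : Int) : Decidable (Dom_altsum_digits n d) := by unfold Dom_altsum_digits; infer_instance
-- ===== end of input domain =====

-- B recomputes each window's alternating digit sum independently instead of A's incremental
-- temp_sum recurrence: simpler, at the cost of O(len·d) instead of O(len) work.

-- int(s[i]) on a digit character, totalized with default 0 (Pre_ keeps every index in range
-- and every character a digit)
def pvDig (s : List Char) (i : Int) : Int :=
  ((PySem.List.pyGetD s i '0').toNat : Int) - 48

-- ===== PORT A =====
-- the body of A's second loop (state: k, temp_sum, dig_sum, broken-flag)
def pvStepA (s : List Char) (d : Int) (st : Int × Int × Int × Bool) : Int × Int × Int × Bool :=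
  match st with
  | (k, temp_sum, dig_sum, done) =>
    if done then (k, temp_sum, dig_sum, done)
    else if (s.length : Int) ≤ d + k then (k, temp_sum, dig_sum, true)
    else
      let left_number := pvDig s k
      let right_number := pvDig s (d + k) * (-1 : Int) ^ (PySem.Int.mod d 2 + 1).toNat
      let temp_sum' := (-1) * (temp_sum - left_number) + right_number
      let dig_sum' := if dig_sum < temp_sum' then temp_sum' else dig_sum
      (k + 1, temp_sum', dig_sum', false)

def altsum_digits (n : Int) (d : Int) : Int :=
  let str_n := PySem.Int.toChars n
  -- for i in range(d): dig_sum += ((-1)**i)*int(str_n[i])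
  let dig_sum := (PySem.List.pyRange 0 d 1).foldl
    (fun (acc : Int) (i : Int) => acc + (-1 : Int) ^ i.toNat * pvDig str_n i) 0
  -- for num in str_n: … (break modelled by the flag; state frozen once it is set)
  let st := str_n.foldl (fun st (_ : Char) => pvStepA str_n d st) (0, dig_sum, dig_sum, false)
  st.2.2.1

-- ===== PORT B =====
def altsum_digits_alt (n : Int) (d : Int) : Int :=
  let s := PySem.Int.toChars n
  -- window(k) = sum((-1)**i * int(s[k+i]) for i in range(d))
  let window := fun (k : Int) =>
    (PySem.List.pyRange 0 d 1).foldl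
      (fun (acc : Int) (i : Int) => acc + (-1 : Int) ^ i.toNat * pvDig s (k + i)) 0
  let best := window 0
  (PySem.List.pyRange 1 ((s.length : Int) - d + 1) 1).foldl
    (fun (b : Int) (k : Int) => let cur := window k; if cur > b then cur else b) best

-- ===== PRECONDITION & SPEC =====
-- Pre_ excludes n < 0 (int('-') raises ValueError) and d > len(str(n)) (IndexError), and
-- d < 0, on which A's returned value comes from Python's negative-index wraparound — an
-- accident of A's implementation outside the task's natural domain of window widths.
def Pre_altsum_digits (n : Int) (d : Int) : Prop :=
  0 ≤ n ∧ 0 ≤ d ∧ d ≤ ((PySem.Int.toChars n).length : Int)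
instance (n : Int) (d : Int) : Decidable (Pre_altsum_digits n d) := by
  unfold Pre_altsum_digits; infer_instance

def pvWitness_altsum_digits : Int × Int := (12345, 2)

def Spec_altsum_digits (n : Int) (d : Int) (out : Int) : Prop := out = altsum_digits_alt n d
instance (n : Int) (d : Int) (out : Int) : Decidable (Spec_altsum_digits n d out) := by
  unfold Spec_altsum_digits; infer_instance

-- ===== CLAIM (what is proved, stated in full; the proofs are below) =====
def Claim_equal_altsum_digits : Prop := ∀ (n : Int) (d : Int), Dom_altsum_digits n d →
  Pre_altsum_digits n d → Spec_altsum_digits n d (altsum_digits n d)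

-- ===== LEMMAS AND PROOFS =====

-- the alternating window sum both programs compute
def pvS (s : List Char) (D : Nat) (k : Int) : Int :=
  ((List.range D).map (fun (i : Nat) => (-1 : Int) ^ i * pvDig s (k + (i : Int)))).sum

-- the running maximum of pvS over windows 0, 1, …, M
def pvBestB (s : List Char) (D : Nat) (M : Nat) : Int :=
  (List.range M).foldl
    (fun (b : Int) (i : Nat) =>
      let cur := pvS s D (1 + (i : Int)); if cur > b then cur else b)
    (pvS s D 0)

lemma pvS_succ (s : List Char) (D : Nat) (k : Int) :
    pvS s (D + 1) k = pvS s D k + (-1 : Int) ^ D * pvDig s (k + (D : Int)) := by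
  simp [pvS, List.range_succ]

lemma pvBestB_succ (s : List Char) (D M : Nat) :
    pvBestB s D (M + 1) =
      if pvS s D (1 + (M : Int)) > pvBestB s D M then pvS s D (1 + (M : Int))
      else pvBestB s D M := by
  rw [pvBestB, pvBestB, List.range_succ, List.foldl_append]
  simp

-- the algebraic identity behind A's temp_sum update
lemma pvS_shift (s : List Char) (D : Nat) (k : Int) :
    pvS s D (k + 1) =
      (-1) * (pvS s D k - pvDig s k) + pvDig s (k + (D : Int)) * (-1 : Int) ^ (D + 1) := by
  induction D generalizing k with
  | zero => simp [pvS]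
  | succ D ih =>
    rw [pvS_succ, pvS_succ, ih]
    have h : k + 1 + (D : Int) = k + ((D : Nat) + 1 : Nat) := by push_cast; ring
    rw [h]
    push_cast
    ring

lemma window_eq_pvS (s : List Char) (d : Int) (hd : 0 ≤ d) (k : Int) :
    (PySem.List.pyRange 0 d 1).foldl
      (fun (acc : Int) (i : Int) => acc + (-1 : Int) ^ i.toNat * pvDig s (k + i)) 0
      = pvS s d.toNat k := by
  rw [PySem.List.pyRange_one, List.foldl_map]
  rw [PySem.List.foldl_add
    (g := fun (i : Nat) => (-1 : Int) ^ ((0 + (i : Int)).toNat) * pvDig s (k + (0 + (i : Int))))]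
  rw [pvS]
  simp only [zero_add, sub_zero]
  congr 1

lemma foldl_const_step {α : Type} (f : α → α) :
    ∀ (t : List Char) (init : α), t.foldl (fun st _ => f st) init = f^[t.length] init := by
  intro t
  induction t with
  | nil => intro init; simp
  | cons c t ih =>
    intro init
    simp [List.foldl_cons, ih, Function.iterate_succ_apply]

lemma pvStepA_frozen (s : List Char) (d : Int) (k temp best : Int) (m : Nat) :
    (pvStepA s d)^[m] (k, temp, best, true) = (k, temp, best, true) := by
  induction m with
  | zero => rfl
  | succ m ih => rw [Function.iterate_succ_apply, pvStepA]; simpa using ih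

lemma mod_two_toNat (d : Int) (hd : 0 ≤ d) :
    (PySem.Int.mod d 2 + 1).toNat = d.toNat % 2 + 1 := by
  rw [PySem.Int.mod_eq_emod_of_pos (by omega)]
  omega

lemma neg_one_pow_mod_two (D : Nat) : ((-1 : Int)) ^ (D % 2 + 1) = (-1 : Int) ^ (D + 1) := by
  rw [pow_succ, pow_succ]
  congr 1
  rcases Nat.even_or_odd D with h | h
  · simp [Nat.even_iff.mp h, h.neg_one_pow]
  · simp [Nat.odd_iff.mp h, h.neg_one_pow]

-- invariant of A's loop: after m steps (m ≤ len - D), state is (m, S m, best m, false)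
lemma pvStepA_invariant (s : List Char) (D : Nat) (hD : D ≤ s.length) :
    ∀ (m : Nat), m ≤ s.length - D →
      (pvStepA s (D : Int))^[m] (0, pvS s D 0, pvS s D 0, false)
        = ((m : Int), pvS s D (m : Int), pvBestB s D m, false) := by
  intro m
  induction m with
  | zero => intro _; simp [pvBestB]
  | succ m ih =>
    intro hm
    rw [Function.iterate_succ_apply', ih (by omega), pvStepA]
    have hlt : ¬ ((s.length : Int) ≤ (D : Int) + (m : Int)) := by push_cast; omega
    simp only [if_neg hlt, Bool.false_eq_true, if_false]
    have htemp : (-1) * (pvS s D (m : Int) - pvDig s (m : Int)) +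
        pvDig s ((D : Int) + (m : Int)) * (-1 : Int) ^ (PySem.Int.mod (D : Int) 2 + 1).toNat
        = pvS s D (1 + (m : Int)) := by
      have h1 : (1 : Int) + (m : Int) = (m : Int) + 1 := by ring
      have h2 : (D : Int) + (m : Int) = (m : Int) + (D : Int) := by ring
      rw [h1, h2, pvS_shift, mod_two_toNat _ (by positivity), Int.toNat_natCast,
        neg_one_pow_mod_two]
    rw [htemp]
    have hbest : (if pvBestB s D m < pvS s D (1 + (m : Int)) then pvS s D (1 + (m : Int))
        else pvBestB s D m) = pvBestB s D (m + 1) := by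
      rw [pvBestB_succ]
    rw [hbest]
    have hcast1 : ((m : Int) + 1) = ((m + 1 : Nat) : Int) := by push_cast; ring
    have hcast2 : ((1 : Int) + (m : Int)) = ((m + 1 : Nat) : Int) := by push_cast; ring
    rw [hcast1, hcast2]
    try rfl

-- A's whole second loop yields best = pvBestB s D (len - D)
lemma loopA_eq (s : List Char) (D : Nat) (hD : D ≤ s.length) :
    ((pvStepA s (D : Int))^[s.length] (0, pvS s D 0, pvS s D 0, false)).2.2.1
      = pvBestB s D (s.length - D) := by
  by_cases h0 : D = 0
  · subst h0
    have := pvStepA_invariant s 0 (by omega) s.length (by omega)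
    simp only [this, Nat.sub_zero]
  · have hsplit : s.length = (D - 1) + ((s.length - D) + 1) := by omega
    conv_lhs => rw [hsplit]
    rw [Function.iterate_add_apply, Function.iterate_succ_apply',
      pvStepA_invariant s D hD (s.length - D) (by omega), pvStepA]
    have hge : ((s.length : Int) ≤ (D : Int) + ((s.length - D : Nat) : Int)) := by
      push_cast [Nat.cast_sub hD]; omega
    simp only [if_pos hge, Bool.false_eq_true, if_false, pvStepA_frozen]

-- ===== VERDICT (by name: the statement is the Claim_ definition above) =====
theorem altsum_digits_spec : Claim_equal_altsum_digits := by
  intro n d _ hpre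
  obtain ⟨hn, hd, hdl⟩ := hpre
  simp only [Spec_altsum_digits, altsum_digits, altsum_digits_alt]
  set s := PySem.Int.toChars n with hs
  have hDcast : ((d.toNat : Int)) = d := Int.toNat_of_nonneg hd
  set D := d.toNat with hDdef
  have hDle : D ≤ s.length := by omega
  have hwin : ∀ k, (PySem.List.pyRange 0 d 1).foldl
      (fun (acc : Int) (i : Int) => acc + (-1 : Int) ^ i.toNat * pvDig s (k + i)) 0
      = pvS s D k := fun k => window_eq_pvS s d hd k
  -- B side
  have hend : (s.length : Int) - d + 1 = ((((s.length - D) : Nat) : Int) + 1) := by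
    push_cast [Nat.cast_sub hDle]; omega
  have hB : (PySem.List.pyRange 1 ((s.length : Int) - d + 1) 1).foldl
      (fun (b : Int) (k : Int) =>
        let cur := (PySem.List.pyRange 0 d 1).foldl
          (fun (acc : Int) (i : Int) => acc + (-1 : Int) ^ i.toNat * pvDig s (k + i)) 0
        if cur > b then cur else b)
      ((PySem.List.pyRange 0 d 1).foldl
        (fun (acc : Int) (i : Int) => acc + (-1 : Int) ^ i.toNat * pvDig s (0 + i)) 0)
      = pvBestB s D (s.length - D) := by
    simp only [hwin]
    rw [hend, PySem.List.pyRange_one]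
    have hc : (((s.length - D : Nat) : Int) + 1 - 1).toNat = s.length - D := by omega
    rw [hc, List.foldl_map, pvBestB]
  -- A side: first sum
  have hA1 : (PySem.List.pyRange 0 d 1).foldl
      (fun (acc : Int) (i : Int) => acc + (-1 : Int) ^ i.toNat * pvDig s i) 0 = pvS s D 0 := by
    rw [← hwin 0]
    congr 1
    funext acc i
    simp
  rw [hA1, hB]
  -- A side: second loop
  rw [foldl_const_step (pvStepA s d)]
  rw [show d = (D : Int) from hDcast.symm] at *
  exact loopA_eq s D hDle
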